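-- pv_equiv track=rewrite | github.com/k1logram/menu_app | menu_app/templatetags/menu_app_tags.py | select_parents_categories_for_category
-- ===== SOURCE A (Python) =====
-- def select_parents_categories_for_category(category_id, categories_parents_dict, categories_in_menu, parents_categories=None):
--     if parents_categories is None:
--         parents_categories = []
--
--     parents_categories.append(category_id)
--     parent_category_current_category = categories_parents_dict[category_id]
--     if parent_category_current_category is None:
--         return parents_categories
--
--     else:
--         return select_parents_categories_for_category(parent_category_current_category, categories_parents_dict, categories_in_menu, parents_categories)
-- ===== SOURCE B (Python) =====
-- def select_parents_categories_for_category(category_id, categories_parents_dict, categories_in_menu, parents_categories=None):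
--     # A terminating parent chain visits distinct keys, so it has at most
--     # len(dict)+1 nodes: drive a bounded for-loop over a (state, chain) pair
--     # instead of recursing, then splice the chain into the caller's list once.
--     state, chain = category_id, []
--     for _ in range(len(categories_parents_dict) + 1):
--         if state is None:
--             break
--         chain.append(state)
--         state = categories_parents_dict[state]
--     if parents_categories is None:
--         return chain
--     parents_categories += chain
--     return parents_categories
-- ===== Notes on version B (the rewrite author's own statement) =====
-- stated objective: alternative
-- what changed: Replaces the accumulator-threading recursion by a bounded for-loop over a (state, chain) pair (at most len(dict)+1 steps, since a terminating chain visits distinct keys) that builds a fresh chain and splices it into the caller's list once.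
import Mathlib
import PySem

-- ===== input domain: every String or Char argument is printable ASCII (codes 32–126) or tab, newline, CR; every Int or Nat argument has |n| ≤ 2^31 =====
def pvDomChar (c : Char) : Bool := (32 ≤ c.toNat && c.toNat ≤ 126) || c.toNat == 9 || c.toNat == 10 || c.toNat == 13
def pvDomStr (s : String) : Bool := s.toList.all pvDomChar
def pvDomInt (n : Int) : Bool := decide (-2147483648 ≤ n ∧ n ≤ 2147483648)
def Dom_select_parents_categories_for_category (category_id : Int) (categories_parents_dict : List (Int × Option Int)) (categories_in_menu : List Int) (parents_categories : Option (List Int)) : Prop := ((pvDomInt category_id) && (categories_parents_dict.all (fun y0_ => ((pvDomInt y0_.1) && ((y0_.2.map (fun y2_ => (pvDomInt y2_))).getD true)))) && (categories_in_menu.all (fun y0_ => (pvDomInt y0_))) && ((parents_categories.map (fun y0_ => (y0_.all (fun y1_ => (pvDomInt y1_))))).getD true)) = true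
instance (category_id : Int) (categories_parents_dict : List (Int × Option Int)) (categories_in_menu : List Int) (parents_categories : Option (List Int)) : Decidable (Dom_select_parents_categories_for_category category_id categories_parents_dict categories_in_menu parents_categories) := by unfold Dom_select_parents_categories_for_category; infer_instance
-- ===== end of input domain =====

-- B replaces A's accumulator-threading recursion by a bounded for-loop (len(dict)+1 steps)
-- folding a (state, chain) pair, then splices the fresh chain into the caller's list once;
-- return value only (both Pythons mutate a passed-in list in place).

-- ===== PORT A =====
-- dict[k] on the association list: first match, none = KeyError (excluded by Pre_).
def pvLookup (d : List (Int × Option Int)) (k : Int) : Option (Option Int) :=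
  (d.find? (fun p => p.1 == k)).map Prod.snd

-- A's recursion, fuel-bounded (Python recursion has no fuel; under Pre_ the chain
-- terminates within d.length+1 steps, so the fuel is never exhausted on admitted inputs).
def pvGoA (d : List (Int × Option Int)) : Nat → Int → List Int → List Int
  | 0, _, acc => acc
  | n+1, cid, acc =>
    let acc := acc ++ [cid]
    match pvLookup d cid with
    | none => acc                -- KeyError (excluded by Pre_)
    | some none => acc
    | some (some p) => pvGoA d n p acc

def select_parents_categories_for_category (category_id : Int) (categories_parents_dict : List (Int × Option Int)) (categories_in_menu : List Int) (parents_categories : Option (List Int)) : List Int :=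
  pvGoA categories_parents_dict (categories_parents_dict.length + 1) category_id (parents_categories.getD [])

-- ===== PORT B =====
-- One iteration of B's for-loop body on the (state, chain) pair; state none = loop done
-- (a missing key raises KeyError in Python; that input is excluded by Pre_).
def pvStepB (d : List (Int × Option Int)) (st : Option Int × List Int) : Option Int × List Int :=
  match st.1 with
  | none => st
  | some x => (((d.find? (fun p => p.1 == x)).map Prod.snd).join, st.2 ++ [x])

def select_parents_categories_for_category_alt (category_id : Int) (categories_parents_dict : List (Int × Option Int)) (categories_in_menu : List Int) (parents_categories : Option (List Int)) : List Int :=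
  let final := (List.range (categories_parents_dict.length + 1)).foldl
    (fun st _ => pvStepB categories_parents_dict st) (some category_id, [])
  match parents_categories with
  | none => final.2
  | some pc => pc ++ final.2

-- ===== PRECONDITION & SPEC =====
-- Pre_ excludes exactly the inputs where the Python A does not return: a KeyError on a
-- missing key along the chain, or non-termination on a parent-pointer cycle. Stated as
-- reachability: some iterate (within the number of dict entries, since a terminating chain
-- visits distinct keys) of the parent map, starting at category_id, reaches a None parent.
-- States of the parent map: some (some x) = at key x, some none = reached a root, none = missing key.
def pvParentStep (d : List (Int × Option Int)) : Option (Option Int) → Option (Option Int)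
  | some (some x) => (d.find? (fun p => p.1 == x)).map Prod.snd
  | s => s

def Pre_select_parents_categories_for_category (category_id : Int) (categories_parents_dict : List (Int × Option Int)) (categories_in_menu : List Int) (parents_categories : Option (List Int)) : Prop :=
  ∃ n ≤ categories_parents_dict.length, (pvParentStep categories_parents_dict)^[n] (some (some category_id)) = some none
instance (category_id : Int) (categories_parents_dict : List (Int × Option Int)) (categories_in_menu : List Int) (parents_categories : Option (List Int)) : Decidable (Pre_select_parents_categories_for_category category_id categories_parents_dict categories_in_menu parents_categories) := by unfold Pre_select_parents_categories_for_category; infer_instance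

def pvWitness_select_parents_categories_for_category : Int × (List (Int × Option Int)) × List Int × Option (List Int) :=
  (1, [(1, some 2), (2, none)], [1, 2], some [7])

def Spec_select_parents_categories_for_category (category_id : Int) (categories_parents_dict : List (Int × Option Int)) (categories_in_menu : List Int) (parents_categories : Option (List Int)) (out : List Int) : Prop := out = select_parents_categories_for_category_alt category_id categories_parents_dict categories_in_menu parents_categories
instance (category_id : Int) (categories_parents_dict : List (Int × Option Int)) (categories_in_menu : List Int) (parents_categories : Option (List Int)) (out : List Int) : Decidable (Spec_select_parents_categories_for_category category_id categories_parents_dict categories_in_menu parents_categories out) := by unfold Spec_select_parents_categories_for_category; infer_instance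

-- ===== CLAIM (what is proved, stated in full; the proofs are below) =====
def Claim_equal_select_parents_categories_for_category : Prop := ∀ (category_id : Int) (categories_parents_dict : List (Int × Option Int)) (categories_in_menu : List Int) (parents_categories : Option (List Int)), Dom_select_parents_categories_for_category category_id categories_parents_dict categories_in_menu parents_categories → Pre_select_parents_categories_for_category category_id categories_parents_dict categories_in_menu parents_categories → Spec_select_parents_categories_for_category category_id categories_parents_dict categories_in_menu parents_categories (select_parents_categories_for_category category_id categories_parents_dict categories_in_menu parents_categories)

-- ===== LEMMAS AND PROOFS =====

-- Proof-side characterisation of the chain produced from cid within n steps.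
def pvChainSpec (d : List (Int × Option Int)) : Nat → Int → List Int
  | 0, _ => []
  | n+1, cid =>
    cid ::
      match pvLookup d cid with
      | some (some p) => pvChainSpec d n p
      | _ => []

-- A's accumulator recursion equals the accumulator prepended to the chain.
theorem pvGoA_eq_chainSpec (d : List (Int × Option Int)) :
    ∀ (n : Nat) (cid : Int) (acc : List Int), pvGoA d n cid acc = acc ++ pvChainSpec d n cid := by
  intro n
  induction n with
  | zero => intro cid acc; simp [pvGoA, pvChainSpec]
  | succ n ih =>
    intro cid acc
    simp only [pvGoA, pvChainSpec]
    cases h : pvLookup d cid with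
    | none => simp
    | some o => cases o with
      | none => simp
      | some p => simp [ih]

-- B's foldl over range is an iterate of the step (the body ignores the index).
theorem pvFoldl_const (d : List (Int × Option Int)) :
    ∀ (l : List Nat) (init : Option Int × List Int),
      l.foldl (fun st _ => pvStepB d st) init = (pvStepB d)^[l.length] init := by
  intro l
  induction l with
  | nil => intro init; simp
  | cons a t ih => intro init; simp [List.foldl_cons, ih, Function.iterate_succ_apply]

theorem pvStepB_fix (d : List (Int × Option Int)) :
    ∀ (n : Nat) (ch : List Int), (pvStepB d)^[n] (none, ch) = (none, ch) := by
  intro n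
  induction n with
  | zero => intro ch; simp
  | succ n ih => intro ch; rw [Function.iterate_succ_apply]; simp [pvStepB, ih]

theorem pvIterate_chain (d : List (Int × Option Int)) :
    ∀ (n : Nat) (cid : Int) (acc : List Int),
      ((pvStepB d)^[n] (some cid, acc)).2 = acc ++ pvChainSpec d n cid := by
  intro n
  induction n with
  | zero => intro cid acc; simp [pvChainSpec]
  | succ n ih =>
    intro cid acc
    rw [Function.iterate_succ_apply]
    simp only [pvStepB, pvChainSpec]
    cases h : pvLookup d cid with
    | none =>
      have h' : ((d.find? (fun p => p.1 == cid)).map Prod.snd) = none := h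
      simp [h', pvStepB_fix]
    | some o => cases o with
      | none =>
        have h' : ((d.find? (fun p => p.1 == cid)).map Prod.snd) = some none := h
        simp [h', pvStepB_fix]
      | some p =>
        have h' : ((d.find? (fun p => p.1 == cid)).map Prod.snd) = some (some p) := h
        simp [h', ih]

-- ===== VERDICT (by name: the statement is the Claim_ definition above) =====
theorem select_parents_categories_for_category_spec : Claim_equal_select_parents_categories_for_category := by
  intro cid d menu pc _ _
  unfold Spec_select_parents_categories_for_category
  unfold select_parents_categories_for_category select_parents_categories_for_category_alt
  rw [pvGoA_eq_chainSpec, pvFoldl_const]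
  simp only [List.length_range]
  rw [pvIterate_chain]
  cases pc <;> simp [Option.getD]
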